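-- pv_equiv track=rewrite | github.com/x200706/ds | DS/PC/PC.py | check_gene
-- ===== SOURCE A (Python) =====
-- def check_gene(a, b):
--     # 邊界1：長度不同直接False（題目可能隱含長度相同，但需防呆）
--     if len(a) != len(b):
--         return False
--     # 邊界2：空字符串直接False
--     if len(a) == 0:
--         return False
--     # 條件1：字符組成完全相同（排序比對）
--     if sorted(a) != sorted(b):
--         return False
--     # 條件2：統計不同位置數量
--     diff_pos = []
--     for i in range(len(a)):
--         if a[i] != b[i]:
--             diff_pos.append(i)
--             # 超過2個直接返回False，優化效率
--             if len(diff_pos) > 2: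
--                 return False
--     # 關鍵修正：僅有2個不同位置，且交換後相等
--     if len(diff_pos) == 2:
--         i, j = diff_pos
--         return a[i] == b[j] and a[j] == b[i]
--     # 其他情況（0/1個不同位置）返回False
--     return False
-- ===== SOURCE B (Python) =====
-- def check_gene(a, b):
--     # Online constant-space state machine over zip(a, b): no sorting and no list of
--     # mismatch positions.  State = (first mismatched pair seen or None, whether a
--     # mirror pair already completed the swap).  A third mismatch, or a second one
--     # that is not the mirror image of the first, fails immediately; success iff
--     # exactly one mirror pair completed (which already implies equal multisets).
--     if len(a) != len(b) or len(a) == 0: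
--         return False
--     first = None
--     done = False
--     for x, y in zip(a, b):
--         if x == y:
--             continue
--         if done or (first is not None and first != (y, x)):
--             return False
--         if first is None:
--             first = (x, y)
--         else:
--             done = True
--     return done
-- ===== Notes on version B (the rewrite author's own statement) =====
-- stated objective: faster
-- what changed: A sorts both strings (O(n log n)) and then collects a list of mismatch positions with a final swap check; B is a single-pass constant-space state machine over zip(a,b) that keeps only the one mismatched pair seen so far and a done flag, failing on a third mismatch or a non-mirror second one -- no sort and no position list, since one completed mirror pair already implies equal multisets.
import Mathlib
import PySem

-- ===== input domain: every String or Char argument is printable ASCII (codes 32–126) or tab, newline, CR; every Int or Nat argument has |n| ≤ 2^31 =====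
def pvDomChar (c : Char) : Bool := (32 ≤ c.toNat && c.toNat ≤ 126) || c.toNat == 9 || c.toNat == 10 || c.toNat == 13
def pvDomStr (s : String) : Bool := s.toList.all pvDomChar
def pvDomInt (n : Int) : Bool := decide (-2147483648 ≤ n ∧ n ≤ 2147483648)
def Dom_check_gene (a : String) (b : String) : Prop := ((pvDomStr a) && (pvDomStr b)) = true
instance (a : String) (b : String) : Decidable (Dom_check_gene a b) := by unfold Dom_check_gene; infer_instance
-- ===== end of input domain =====

-- B replaces A's sort + mismatch-position list with a single-pass constant-space state machine over zip(a,b) (O(n) vs O(n log n)).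

-- ===== PORT A =====
-- A's tail code: 'if len(diff_pos)==2: i,j = diff_pos; return a[i]==b[j] and a[j]==b[i]; return False'
def checkGeneFinal (la lb : List Char) (diff_pos : List Int) : Bool :=
  match diff_pos with
  | [i, j] => decide (PySem.List.pyGetD la i ' ' = PySem.List.pyGetD lb j ' ') &&
              decide (PySem.List.pyGetD la j ' ' = PySem.List.pyGetD lb i ' ')
  | _ => false

-- A's 'for i in range(len(a)):' loop with the early 'return False' when len(diff_pos) > 2
def checkGeneLoop (la lb : List Char) : List Int → List Int → Bool
  | [], diff_pos => checkGeneFinal la lb diff_pos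
  | i :: rest, diff_pos =>
    if PySem.List.pyGetD la i ' ' ≠ PySem.List.pyGetD lb i ' ' then
      let dp := diff_pos ++ [i]
      if dp.length > 2 then false else checkGeneLoop la lb rest dp
    else checkGeneLoop la lb rest diff_pos

def check_gene (a : String) (b : String) : Bool :=
  let la := a.toList
  let lb := b.toList
  if PySem.Str.len a ≠ PySem.Str.len b then false
  else if PySem.Str.len a = 0 then false
  else if PySem.List.sorted la (fun x => x) false ≠ PySem.List.sorted lb (fun x => x) false then false
  else checkGeneLoop la lb (PySem.List.pyRange 0 (PySem.Str.len a) 1) []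

-- ===== PORT B =====
-- B's 'for x, y in zip(a, b):' state machine: first = one mismatched pair seen (or none), done = swap completed
def altLoop : List (Char × Char) → Option (Char × Char) → Bool → Bool
  | [], _, done => done
  | (x, y) :: rest, first, done =>
    if x = y then altLoop rest first done
    else if done = true ∨ (first.isSome ∧ first ≠ some (y, x)) then false
    else match first with
      | none => altLoop rest (some (x, y)) done
      | some _ => altLoop rest first true

def check_gene_alt (a : String) (b : String) : Bool :=
  let la := a.toList
  let lb := b.toList
  if PySem.Str.len a ≠ PySem.Str.len b ∨ PySem.Str.len a = 0 then false
  else altLoop (la.zip lb) none false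

-- ===== PRECONDITION & SPEC =====
def Spec_check_gene (a : String) (b : String) (out : Bool) : Prop := out = check_gene_alt a b
instance (a : String) (b : String) (out : Bool) : Decidable (Spec_check_gene a b out) := by unfold Spec_check_gene; infer_instance

-- ===== CLAIM (what is proved, stated in full; the proofs are below) =====
def Claim_equal_check_gene : Prop := ∀ (a : String) (b : String), Dom_check_gene a b → Spec_check_gene a b (check_gene a b)

-- ===== LEMMAS AND PROOFS =====

-- any diff_pos list whose length is not 2 fails A's final check
theorem checkGeneFinal_len_ne_two (la lb : List Char) (dp : List Int) (h : dp.length ≠ 2) :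
    checkGeneFinal la lb dp = false := by
  match dp with
  | [] => rfl
  | [_] => rfl
  | [_, _] => simp at h
  | _ :: _ :: _ :: _ => rfl

-- the loop (with its early exit) computes the final check on acc ++ filtered indices
theorem checkGeneLoop_eq (la lb : List Char) (idxs acc : List Int) :
    checkGeneLoop la lb idxs acc =
      checkGeneFinal la lb (acc ++ idxs.filter
        (fun i => PySem.List.pyGetD la i ' ' ≠ PySem.List.pyGetD lb i ' ')) := by
  induction idxs generalizing acc with
  | nil => simp [checkGeneLoop]
  | cons i rest ih =>
    by_cases hd : PySem.List.pyGetD la i ' ' = PySem.List.pyGetD lb i ' '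
    · have step : checkGeneLoop la lb (i :: rest) acc = checkGeneLoop la lb rest acc := by
        simp only [checkGeneLoop]; rw [if_neg]; simp [hd]
      rw [step, ih]
      congr 1
      simp [hd]
    · have step : checkGeneLoop la lb (i :: rest) acc =
          if (acc ++ [i]).length > 2 then false else checkGeneLoop la lb rest (acc ++ [i]) := by
        simp only [checkGeneLoop]; rw [if_pos hd]
      have hfc : (i :: rest).filter
            (fun i => PySem.List.pyGetD la i ' ' ≠ PySem.List.pyGetD lb i ' ')
          = i :: rest.filter (fun i => PySem.List.pyGetD la i ' ' ≠ PySem.List.pyGetD lb i ' ') := by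
        simp [hd]
      rw [step, hfc]
      by_cases hl : (acc ++ [i]).length > 2
      · rw [if_pos hl, eq_comm]
        apply checkGeneFinal_len_ne_two
        have hlen : 2 < acc.length + 1 := by simpa using hl
        simp only [List.length_append, List.length_cons]
        omega
      · rw [if_neg hl, ih]
        congr 1
        simp

-- nat-index filter/map on two equal-length lists is the filtered zip, paired
theorem filter_range_eq_zip_filter (la lb : List Char) (h : la.length = lb.length) :
    ((List.range la.length).filter
        (fun k => la.getD k ' ' ≠ lb.getD k ' ')).map
      (fun k => (la.getD k ' ', lb.getD k ' '))
      = (la.zip lb).filter (fun p => p.1 ≠ p.2) := by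
  induction la generalizing lb with
  | nil => cases lb with
    | nil => simp
    | cons y lb' => simp at h
  | cons x la' ih =>
    cases lb with
    | nil => simp at h
    | cons y lb' =>
      have h' : la'.length = lb'.length := by simpa using h
      rw [List.length_cons, List.range_succ_eq_map, List.zip_cons_cons]
      have hP : ((fun k => !decide ((x :: la')[k]?.getD ' ' = (y :: lb')[k]?.getD ' ')) ∘ Nat.succ)
          = (fun k => !decide (la'[k]?.getD ' ' = lb'[k]?.getD ' ')) := by
        funext k; simp [Function.comp]
      have hF : ((fun k => ((x :: la')[k]?.getD ' ', (y :: lb')[k]?.getD ' ')) ∘ Nat.succ)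
          = (fun k => (la'[k]?.getD ' ', lb'[k]?.getD ' ')) := by
        funext k; simp [Function.comp]
      have ih' := ih lb' h'
      simp only [List.getD_eq_getElem?_getD, ne_eq, decide_not] at ih'
      by_cases hxy : x = y
      · subst hxy
        simp only [List.filter_cons, List.filter_map, List.getD_eq_getElem?_getD,
          List.getElem?_cons_zero, Option.getD_some]
        simp only [ne_eq, not_true_eq_false, decide_false]
        simp [hP, hF, ih']
      · simp only [List.filter_cons, List.filter_map, List.getD_eq_getElem?_getD,
          List.getElem?_cons_zero, Option.getD_some]
        simp [hP, hF, ih', hxy]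

-- proof-only abbreviation: "exactly two mismatched pairs, mirror images of each other"
def mirrorTwo (l : List (Char × Char)) : Bool :=
  match l with
  | [p, q] => decide (p = (q.2, q.1))
  | _ => false

-- the two final checks agree once the index list is translated to the pair list
theorem final_agree (la lb : List Char) (h : la.length = lb.length) :
    checkGeneFinal la lb
        ((PySem.List.pyRange 0 (la.length : Int) 1).filter
          (fun i => PySem.List.pyGetD la i ' ' ≠ PySem.List.pyGetD lb i ' '))
      = mirrorTwo ((la.zip lb).filter (fun p => p.1 ≠ p.2)) := by
  have hR : PySem.List.pyRange 0 (la.length : Int) 1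
      = (List.range la.length).map (fun k : ℕ => (k : Int)) := by
    simpa using PySem.List.pyRange_zero_natCast la.length
  rw [hR, List.filter_map]
  have hg : ((fun i => decide (PySem.List.pyGetD la i ' ' ≠ PySem.List.pyGetD lb i ' '))
        ∘ (fun k : ℕ => (k : Int)))
      = fun k => decide (la.getD k ' ' ≠ lb.getD k ' ') := by
    funext k; simp [Function.comp]
  rw [hg, ← filter_range_eq_zip_filter la lb h]
  rcases hcase : (List.range la.length).filter (fun k => decide (la.getD k ' ' ≠ lb.getD k ' '))
    with _ | ⟨k1, _ | ⟨k2, _ | ⟨k3, t⟩⟩⟩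
  · simp [checkGeneFinal, mirrorTwo]
  · simp [checkGeneFinal, mirrorTwo]
  · simp only [List.map_cons, List.map_nil, checkGeneFinal, mirrorTwo]
    simp [Prod.ext_iff, Bool.decide_and, eq_comm]
  · simp [checkGeneFinal, mirrorTwo]

-- B's state machine ignores matched pairs: running it on l is running it on l's mismatches
theorem altLoop_filter (l : List (Char × Char)) (first : Option (Char × Char)) (done : Bool) :
    altLoop l first done = altLoop (l.filter (fun p => p.1 ≠ p.2)) first done := by
  induction l generalizing first done with
  | nil => rfl
  | cons p rest ih =>
    obtain ⟨x, y⟩ := p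
    by_cases hxy : x = y
    · subst hxy
      have : altLoop ((x, x) :: rest) first done = altLoop rest first done := by
        simp [altLoop]
      rw [this, ih]
      congr 1
      simp
    · have hfc : ((x, y) :: rest).filter (fun p => p.1 ≠ p.2)
          = (x, y) :: rest.filter (fun p => p.1 ≠ p.2) := by simp [hxy]
      rw [hfc]
      simp only [altLoop, if_neg hxy]
      by_cases hb : done = true ∨ (first.isSome ∧ first ≠ some (y, x))
      · rw [if_pos hb, if_pos hb]
      · rw [if_neg hb, if_neg hb]
        cases first with
        | none => exact ih _ _
        | some f => exact ih _ _

-- on a list of genuine mismatches the state machine is the two-mirror-pairs test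
theorem altLoop_mismatch (l : List (Char × Char)) (hm : ∀ p ∈ l, p.1 ≠ p.2) :
    altLoop l none false = mirrorTwo l := by
  rcases l with _ | ⟨p, _ | ⟨q, _ | ⟨r, t⟩⟩⟩
  · rfl
  · obtain ⟨x, y⟩ := p
    have hxy : x ≠ y := hm (x, y) (by simp)
    simp [altLoop, mirrorTwo, hxy]
  · obtain ⟨x, y⟩ := p
    obtain ⟨u, v⟩ := q
    have hxy : x ≠ y := hm (x, y) (by simp)
    have huv : u ≠ v := hm (u, v) (by simp)
    by_cases hmir : (x, y) = (v, u)
    · simp [altLoop, mirrorTwo, hxy, huv, hmir]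
    · simp [altLoop, mirrorTwo, hxy, huv, hmir]
  · obtain ⟨x, y⟩ := p
    obtain ⟨u, v⟩ := q
    obtain ⟨s, w⟩ := r
    have hxy : x ≠ y := hm (x, y) (by simp)
    have huv : u ≠ v := hm (u, v) (by simp)
    have hsw : s ≠ w := hm (s, w) (by simp)
    by_cases hmir : (x, y) = (v, u)
    · simp [altLoop, mirrorTwo, hxy, huv, hsw, hmir]
    · simp [altLoop, mirrorTwo, hxy, huv, hmir]

-- multiset bookkeeping: la plus the b-sides of the mismatches = lb plus the a-sides
theorem multiset_diff_balance (la lb : List Char) (h : la.length = lb.length) :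
    (↑la : Multiset Char) + ↑(((la.zip lb).filter (fun p => p.1 ≠ p.2)).map Prod.snd)
      = (↑lb : Multiset Char) + ↑(((la.zip lb).filter (fun p => p.1 ≠ p.2)).map Prod.fst) := by
  induction la generalizing lb with
  | nil => cases lb with
    | nil => rfl
    | cons y lb' => simp at h
  | cons x la' ih =>
    cases lb with
    | nil => simp at h
    | cons y lb' =>
      have h' : la'.length = lb'.length := by simpa using h
      by_cases hxy : x ≠ y
      · have hfc : ((x, y) :: la'.zip lb').filter (fun p => p.1 ≠ p.2)
            = (x, y) :: (la'.zip lb').filter (fun p => p.1 ≠ p.2) := by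
          simp [hxy]
        rw [List.zip_cons_cons, hfc]
        simp only [List.map_cons, ← Multiset.cons_coe, Multiset.cons_add, Multiset.add_cons]
        rw [Multiset.cons_swap x y]
        exact congrArg _ (congrArg _ (ih lb' h'))
      · simp only [ne_eq, not_not] at hxy
        subst hxy
        have hfc : ((x, x) :: la'.zip lb').filter (fun p => p.1 ≠ p.2)
            = (la'.zip lb').filter (fun p => p.1 ≠ p.2) := by
          simp
        rw [List.zip_cons_cons, hfc]
        simp only [← Multiset.cons_coe, Multiset.cons_add]
        exact congrArg _ (ih lb' h')

-- two mirror-image mismatches force the two strings to be permutations of each other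
theorem perm_of_swap_diff (la lb : List Char) (h : la.length = lb.length)
    (p q : Char × Char)
    (hd : (la.zip lb).filter (fun r => r.1 ≠ r.2) = [p, q])
    (hpq : p = (q.2, q.1)) : la.Perm lb := by
  have hm := multiset_diff_balance la lb h
  rw [hd, hpq] at hm
  simp only [List.map_cons, List.map_nil] at hm
  have hmm : (↑[q.2, q.1] : Multiset Char) = (↑[q.1, q.2] : Multiset Char) := by
    simp only [← Multiset.cons_coe]
    exact Multiset.cons_swap q.2 q.1 _
  rw [show ([(q.2, q.1).snd, q.snd] : List Char) = [q.1, q.2] from rfl,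
      show ([(q.2, q.1).fst, q.fst] : List Char) = [q.2, q.1] from rfl, hmm] at hm
  have := add_right_cancel hm
  exact Multiset.coe_eq_coe.mp this

theorem check_gene_spec : Claim_equal_check_gene := by
  unfold Claim_equal_check_gene Spec_check_gene
  intro a b _
  unfold check_gene check_gene_alt
  by_cases h1 : PySem.Str.len a ≠ PySem.Str.len b
  · rw [if_pos h1, if_pos (Or.inl h1)]
  · rw [if_neg h1]
    by_cases h2 : PySem.Str.len a = 0
    · rw [if_pos h2, if_pos (Or.inr h2)]
    · rw [if_neg h2]
      have hlen : a.toList.length = b.toList.length := by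
        have := not_not.mp h1
        simp only [PySem.Str.len_eq] at this
        exact_mod_cast this
      have hB : altLoop (a.toList.zip b.toList) none false
          = mirrorTwo ((a.toList.zip b.toList).filter (fun p => p.1 ≠ p.2)) := by
        rw [altLoop_filter]
        refine altLoop_mismatch _ (fun p hp => ?_)
        have := List.of_mem_filter hp
        simpa using this
      have hloop : checkGeneLoop a.toList b.toList
            (PySem.List.pyRange 0 (PySem.Str.len a) 1) []
          = mirrorTwo ((a.toList.zip b.toList).filter (fun p => p.1 ≠ p.2)) := by
        rw [checkGeneLoop_eq, List.nil_append]
        have hl : PySem.Str.len a = (a.toList.length : Int) := by simp [PySem.Str.len_eq]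
        rw [hl]
        exact final_agree a.toList b.toList hlen
      by_cases h3 : PySem.List.sorted a.toList (fun x => x) false
          = PySem.List.sorted b.toList (fun x => x) false
      · rw [if_neg (not_not.mpr h3), if_neg (fun hc => hc.elim h1 h2)]
        rw [hloop, hB]
      · rw [if_pos h3, if_neg (fun hc => hc.elim h1 h2)]
        rw [hB]
        rcases hd : (a.toList.zip b.toList).filter (fun p => p.1 ≠ p.2)
          with _ | ⟨p, _ | ⟨q, _ | ⟨r, t⟩⟩⟩
        · rw [hd]; rfl
        · rw [hd]; rfl
        · rw [hd]
          by_cases hpq : p = (q.2, q.1)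
          · exact absurd ((PySem.List.sorted_id_eq_sorted_id_iff_perm _ _).mpr
              (perm_of_swap_diff a.toList b.toList hlen p q hd hpq)) h3
          · simp [mirrorTwo, hpq]
        · rw [hd]; rfl
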